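-- pv_equiv track=rewrite | github.com/slanthaler/latex_document | latex_document.py | list2array
-- ===== SOURCE A (Python) =====
-- import math, os
--
-- def transpose(M):
--     return [[M[j][i] for j in range(len(M))] for i in range(len(M[0]))]
--
-- def list2array(list, columns, row_first, fill=None):
--     '''
--     convert list to array
--     '''
--     rows = math.ceil( len(list) / columns )
--     list += (rows*columns - len(list)) * [fill]
--     array = []
--     ind = 0
--     if row_first==False:
--         rows,columns = columns,rows
--     #
--     for row in range(rows):
--         array.append([])
--         for col in range(columns):
--             array[row].append(list[ind])
--             ind += 1
--     #
--     if row_first==False: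
--         array = transpose(array)
--     return array
-- ===== SOURCE B (Python) =====
-- import math
--
-- def list2array(list, columns, row_first, fill=None):
--     '''
--     convert list to array (same in-place padding of `list` as the original)
--     '''
--     rows = math.ceil(len(list) / columns)
--     list += (rows*columns - len(list)) * [fill]
--     if row_first:
--         return [[list[i*columns + j] for j in range(columns)] for i in range(rows)]
--     return [[list[j*rows + i] for j in range(columns)] for i in range(rows)]
-- ===== Notes on version B (the rewrite author's own statement) =====
-- stated objective: simpler
-- what changed: B drops the transpose helper and the running index counter: after the same in-place padding it builds the result directly as a comprehension reading each cell by the index formula i*columns+j (row_first) or j*rows+i (column-first), so the column-first case needs no fill-then-transpose pass.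
import Mathlib
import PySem

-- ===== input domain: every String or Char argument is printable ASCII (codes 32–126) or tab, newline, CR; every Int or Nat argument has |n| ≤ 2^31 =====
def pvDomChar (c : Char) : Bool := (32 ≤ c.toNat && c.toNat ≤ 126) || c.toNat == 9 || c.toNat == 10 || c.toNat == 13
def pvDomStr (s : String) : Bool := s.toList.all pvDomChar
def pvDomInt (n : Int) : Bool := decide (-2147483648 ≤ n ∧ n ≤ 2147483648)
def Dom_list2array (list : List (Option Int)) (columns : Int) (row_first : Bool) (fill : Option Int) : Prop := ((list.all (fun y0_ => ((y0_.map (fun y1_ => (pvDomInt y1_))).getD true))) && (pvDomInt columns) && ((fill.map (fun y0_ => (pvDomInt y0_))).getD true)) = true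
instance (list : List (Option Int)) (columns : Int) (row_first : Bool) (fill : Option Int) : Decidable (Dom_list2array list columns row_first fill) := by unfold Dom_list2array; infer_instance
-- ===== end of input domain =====

-- B removes A's transpose pass and running index counter, reading each cell from the padded
-- list by a direct index formula (objective: simpler).  Both A and B pad the argument `list`
-- in place identically (`list += …`); the equivalence proved here is about the RETURN value.

-- ===== PORT A =====
-- transpose(M): M[0] raises IndexError on empty M in Python (never reached under Pre_);
-- `M.headD []` stands for M[0] and pyGetD for the (there always in-range) M[j][i].
def transposeA (M : List (List (Option Int))) : List (List (Option Int)) :=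
  (PySem.List.pyRange 0 ((M.headD []).length : Int) 1).map (fun i =>
    (PySem.List.pyRange 0 (M.length : Int) 1).map (fun j =>
      PySem.List.pyGetD (PySem.List.pyGetD M j []) i none))

-- math.ceil(len(list)/columns): float true division is exact on Dom (all values < 2^53),
-- ported as the exact ceiling -((-len) // columns); columns = 0 raises (excluded by Pre_).
-- list[ind] is always in range where Python returns; pyGetD stands for it.
def list2array (list : List (Option Int)) (columns : Int) (row_first : Bool) (fill : Option Int) : List (List (Option Int)) :=
  let rows : Int := -(PySem.Int.floordiv (-(list.length : Int)) columns)
  let lst := list ++ List.replicate (rows * columns - (list.length : Int)).toNat fill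
  let d : Int × Int := if row_first = false then (columns, rows) else (rows, columns)
  let st := (PySem.List.pyRange 0 d.1 1).foldl
      (fun (st : List (List (Option Int)) × Int) (_ : Int) =>
        let inner := (PySem.List.pyRange 0 d.2 1).foldl
          (fun (st2 : List (Option Int) × Int) (_ : Int) =>
            (st2.1 ++ [PySem.List.pyGetD lst st2.2 none], st2.2 + 1)) ([], st.2)
        (st.1 ++ [inner.1], inner.2)) ([], (0 : Int))
  if row_first = false then transposeA st.1 else st.1

-- ===== PORT B =====
def list2array_alt (list : List (Option Int)) (columns : Int) (row_first : Bool) (fill : Option Int) : List (List (Option Int)) :=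
  let rows : Int := -(PySem.Int.floordiv (-(list.length : Int)) columns)
  let lst := list ++ List.replicate (rows * columns - (list.length : Int)).toNat fill
  if row_first then
    (PySem.List.pyRange 0 rows 1).map (fun i =>
      (PySem.List.pyRange 0 columns 1).map (fun j =>
        PySem.List.pyGetD lst (i * columns + j) none))
  else
    (PySem.List.pyRange 0 rows 1).map (fun i =>
      (PySem.List.pyRange 0 columns 1).map (fun j =>
        PySem.List.pyGetD lst (j * rows + i) none))

-- ===== PRECONDITION & SPEC =====
-- Pre_ excludes exactly the inputs where Python A raises: columns = 0 (ZeroDivisionError in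
-- math.ceil) and columns < 0 with row_first = False (the fill loops run zero times, so
-- transpose([]) evaluates M[0] and raises IndexError).
def Pre_list2array (list : List (Option Int)) (columns : Int) (row_first : Bool) (fill : Option Int) : Prop :=
  columns ≠ 0 ∧ (0 < columns ∨ row_first = true)
instance (list : List (Option Int)) (columns : Int) (row_first : Bool) (fill : Option Int) : Decidable (Pre_list2array list columns row_first fill) := by unfold Pre_list2array; infer_instance

def pvWitness_list2array : List (Option Int) × Int × Bool × Option Int :=
  ([some 1, some 2, none, some 4, some 5], 2, false, some 0)

def Spec_list2array (list : List (Option Int)) (columns : Int) (row_first : Bool) (fill : Option Int) (out : List (List (Option Int))) : Prop := out = list2array_alt list columns row_first fill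
instance (list : List (Option Int)) (columns : Int) (row_first : Bool) (fill : Option Int) (out : List (List (Option Int))) : Decidable (Spec_list2array list columns row_first fill out) := by unfold Spec_list2array; infer_instance

-- ===== CLAIM (what is proved, stated in full; the proofs are below) =====
def Claim_equal_list2array : Prop := ∀ (list : List (Option Int)) (columns : Int) (row_first : Bool) (fill : Option Int), Dom_list2array list columns row_first fill → Pre_list2array list columns row_first fill → Spec_list2array list columns row_first fill (list2array list columns row_first fill)


-- ===== LEMMAS AND PROOFS =====

-- A's inner (column) loop: appends one cell per step and advances the counter.
theorem fold_inner (f : Int → Option Int) (n : Nat) (acc : List (Option Int)) (ind : Int) :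
    (List.range n).foldl
      (fun (st2 : List (Option Int) × Int) (_ : Nat) => (st2.1 ++ [f st2.2], st2.2 + 1)) (acc, ind)
    = (acc ++ (List.range n).map (fun (j : Nat) => f (ind + (j : Int))), ind + (n : Int)) := by
  induction n generalizing acc ind with
  | zero => simp
  | succ n ih =>
    rw [List.range_succ, List.foldl_append, ih, List.foldl_cons, List.foldl_nil]
    refine Prod.ext ?_ ?_
    · simp [List.append_assoc]
    · push_cast; ring

-- A's outer (row) loop: collects the rows while the counter walks row-major.
theorem fold_outer (f : Int → Option Int) (c m : Nat) (acc : List (List (Option Int))) (ind : Int) :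
    (List.range m).foldl
      (fun (st : List (List (Option Int)) × Int) (_ : Nat) =>
        (st.1 ++ [((List.range c).foldl
            (fun (st2 : List (Option Int) × Int) (_ : Nat) => (st2.1 ++ [f st2.2], st2.2 + 1)) ([], st.2)).1],
         ((List.range c).foldl
            (fun (st2 : List (Option Int) × Int) (_ : Nat) => (st2.1 ++ [f st2.2], st2.2 + 1)) ([], st.2)).2)) (acc, ind)
    = (acc ++ (List.range m).map (fun (r : Nat) => (List.range c).map (fun (j : Nat) => f (ind + (r : Int) * (c : Int) + (j : Int)))),
       ind + (m : Int) * (c : Int)) := by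
  induction m generalizing acc ind with
  | zero => simp
  | succ m ih =>
    rw [List.range_succ, List.foldl_append, ih, List.foldl_cons, List.foldl_nil, fold_inner]
    refine Prod.ext ?_ ?_
    · simp only [List.map_append, List.map_cons, List.map_nil, List.append_assoc, List.nil_append]
    · push_cast; ring

-- A's filled array (outer count a, inner count b), as a map of maps.
theorem a_core (L : List (Option Int)) (a b : Int) :
    ((PySem.List.pyRange 0 a 1).foldl
      (fun (st : List (List (Option Int)) × Int) (_ : Int) =>
        let inner := (PySem.List.pyRange 0 b 1).foldl
          (fun (st2 : List (Option Int) × Int) (_ : Int) =>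
            (st2.1 ++ [PySem.List.pyGetD L st2.2 none], st2.2 + 1)) ([], st.2)
        (st.1 ++ [inner.1], inner.2)) ([], (0 : Int))).1
    = (List.range a.toNat).map (fun (r : Nat) => (List.range b.toNat).map (fun (j : Nat) =>
        PySem.List.pyGetD L ((r : Int) * (b.toNat : Int) + (j : Int)) none)) := by
  rw [PySem.List.pyRange_zero a, PySem.List.pyRange_zero b]
  simp only [List.foldl_map]
  rw [fold_outer (fun t => PySem.List.pyGetD L t none) b.toNat a.toNat [] 0]
  simp

-- row_first = True, columns > 0
theorem main_true (L : List (Option Int)) (a b : Int) (hb : 0 ≤ b) :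
    ((PySem.List.pyRange 0 a 1).foldl
      (fun (st : List (List (Option Int)) × Int) (_ : Int) =>
        let inner := (PySem.List.pyRange 0 b 1).foldl
          (fun (st2 : List (Option Int) × Int) (_ : Int) =>
            (st2.1 ++ [PySem.List.pyGetD L st2.2 none], st2.2 + 1)) ([], st.2)
        (st.1 ++ [inner.1], inner.2)) ([], (0 : Int))).1
    = (PySem.List.pyRange 0 a 1).map (fun i => (PySem.List.pyRange 0 b 1).map (fun j =>
        PySem.List.pyGetD L (i * b + j) none)) := by
  rw [a_core, PySem.List.pyRange_zero a, PySem.List.pyRange_zero b]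
  simp only [List.map_map]
  apply List.map_congr_left; intro r _
  simp only [Function.comp]
  apply List.map_congr_left; intro j _
  simp only [Function.comp]
  rw [Int.toNat_of_nonneg hb]

-- row_first = True, rows ≤ 0 (negative columns): both sides are the empty array
theorem main_nonpos (L : List (Option Int)) (a b : Int) (ha : a ≤ 0) :
    ((PySem.List.pyRange 0 a 1).foldl
      (fun (st : List (List (Option Int)) × Int) (_ : Int) =>
        let inner := (PySem.List.pyRange 0 b 1).foldl
          (fun (st2 : List (Option Int) × Int) (_ : Int) =>
            (st2.1 ++ [PySem.List.pyGetD L st2.2 none], st2.2 + 1)) ([], st.2)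
        (st.1 ++ [inner.1], inner.2)) ([], (0 : Int))).1
    = (PySem.List.pyRange 0 a 1).map (fun i => (PySem.List.pyRange 0 b 1).map (fun j =>
        PySem.List.pyGetD L (i * b + j) none)) := by
  have h : PySem.List.pyRange 0 a 1 = [] := by
    rw [PySem.List.pyRange_zero a, show a.toNat = 0 by omega]
    simp
  rw [h]
  simp

-- row_first = False, columns = b > 0, rows = a ≥ 0: A fills a b×a array and transposes it
theorem main_false (L : List (Option Int)) (a b : Int) (ha : 0 ≤ a) (hb : 0 < b) :
    transposeA ((PySem.List.pyRange 0 b 1).foldl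
      (fun (st : List (List (Option Int)) × Int) (_ : Int) =>
        let inner := (PySem.List.pyRange 0 a 1).foldl
          (fun (st2 : List (Option Int) × Int) (_ : Int) =>
            (st2.1 ++ [PySem.List.pyGetD L st2.2 none], st2.2 + 1)) ([], st.2)
        (st.1 ++ [inner.1], inner.2)) ([], (0 : Int))).1
    = (PySem.List.pyRange 0 a 1).map (fun i => (PySem.List.pyRange 0 b 1).map (fun j =>
        PySem.List.pyGetD L (j * a + i) none)) := by
  rw [a_core]
  set M : List (List (Option Int)) :=
    (List.range b.toNat).map (fun (r : Nat) => (List.range a.toNat).map (fun (j : Nat) =>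
      PySem.List.pyGetD L ((r : Int) * (a.toNat : Int) + (j : Int)) none)) with hM
  have hbpos : 0 < b.toNat := by omega
  have hhead : M.headD [] = (List.range a.toNat).map (fun (j : Nat) =>
      PySem.List.pyGetD L (((0 : Nat) : Int) * (a.toNat : Int) + (j : Int)) none) := by
    rw [hM]
    obtain ⟨b', hb'⟩ : ∃ b', b.toNat = b' + 1 := ⟨b.toNat - 1, by omega⟩
    rw [hb', List.range_succ_eq_map]
    simp
  have hheadlen : (M.headD []).length = a.toNat := by rw [hhead]; simp
  have hMlen : M.length = b.toNat := by rw [hM]; simp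
  unfold transposeA
  rw [hheadlen, hMlen, PySem.List.pyRange_zero ((a.toNat : Int)),
      PySem.List.pyRange_zero ((b.toNat : Int)), PySem.List.pyRange_zero a, PySem.List.pyRange_zero b]
  simp only [List.map_map, Int.toNat_natCast]
  apply List.map_congr_left; intro i hi
  simp only [Function.comp]
  apply List.map_congr_left; intro j hj
  simp only [Function.comp]
  have hMj : PySem.List.pyGetD M ((j : Nat) : Int) [] = (List.range a.toNat).map (fun (c : Nat) =>
      PySem.List.pyGetD L (((j : Nat) : Int) * (a.toNat : Int) + (c : Int)) none) := by
    rw [PySem.List.pyGetD_natCast, hM,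
        List.getD_eq_getElem _ _ (by simpa using List.mem_range.mp hj)]
    simp
  rw [hMj, PySem.List.pyGetD_natCast,
      List.getD_eq_getElem _ _ (by simpa using List.mem_range.mp hi)]
  simp only [List.getElem_map, List.getElem_range]
  rw [Int.toNat_of_nonneg ha]

-- ===== VERDICT (by name: the statement is the Claim_ definition above) =====
theorem list2array_spec : Claim_equal_list2array := by
  intro list columns row_first fill _hdom hpre
  obtain ⟨hc0, hcase⟩ := hpre
  have hlen0 : (0 : Int) ≤ (list.length : Int) := by positivity
  unfold Spec_list2array
  cases row_first with
  | true =>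
    by_cases hcpos : 0 < columns
    · exact main_true _ _ columns hcpos.le
    · have hcneg : columns < 0 := by omega
      have hfd : 0 ≤ PySem.Int.floordiv (-(list.length : Int)) columns := by
        have h := PySem.Int.floordiv_neg_neg (list.length : Int) (-columns)
        simp only [neg_neg] at h
        rw [h, PySem.Int.le_floordiv_iff_mul_le (by omega : (0 : Int) < -columns)]
        omega
      exact main_nonpos _ (-(PySem.Int.floordiv (-(list.length : Int)) columns)) columns (by omega)
  | false =>
    have hcpos : 0 < columns := by
      rcases hcase with h | h
      · exact h
      · exact absurd h (by simp)
    have ha : 0 ≤ -(PySem.Int.floordiv (-(list.length : Int)) columns) := by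
      have h1 : ¬ (1 ≤ PySem.Int.floordiv (-(list.length : Int)) columns) := by
        rw [PySem.Int.le_floordiv_iff_mul_le hcpos]; omega
      omega
    exact main_false _ _ columns ha hcpos
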